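-- pv_equiv track=rewrite | github.com/Shreya3199/lambda-amplify-einsteinRepLibMetaCard | lambda_function.py | generate_filtered_prompt
-- ===== SOURCE A (Python) =====
-- def generate_filtered_prompt(prompt_lines, allowed_aliases):
--     final_lines = []
--     i = 0
--     n = len(prompt_lines)
--
--     while i < n:
--         line = prompt_lines[i]
--
--         if line.startswith("|SEC-CHECK__"):
--             alias = line.split("|")[1].replace("SEC-CHECK__", "")
--             is_allowed = alias in allowed_aliases
--
--             if is_allowed:
--                 # Include this line (cleaned)
--                 final_lines.append(line.split("|", 2)[2])
--                 i += 1
--                 # Skip all following |SEC-FREE-ALT| lines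
--                 while i < n and prompt_lines[i].startswith("|SEC-FREE-ALT|"):
--                     i += 1
--             else:
--                 # Skip this line
--                 i += 1
--                 # Include all following |SEC-FREE-ALT| lines (cleaned)
--                 while i < n and prompt_lines[i].startswith("|SEC-FREE-ALT|"):
--                     final_lines.append(prompt_lines[i].split("|", 2)[2])
--                     i += 1
--         else:
--             # Normal line, just include
--             final_lines.append(line)
--             i += 1
--
--     return "\n".join(final_lines)
-- ===== SOURCE B (Python) =====
-- def generate_filtered_prompt(prompt_lines, allowed_aliases):
--     final_lines = []
--     state = 'plain'  # 'plain' | 'skip_alts' | 'include_alts'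
--     for line in prompt_lines:
--         if line.startswith("|SEC-CHECK__"):
--             alias = line.split("|")[1].replace("SEC-CHECK__", "")
--             if alias in allowed_aliases:
--                 final_lines.append(line.split("|", 2)[2])
--                 state = 'skip_alts'
--             else:
--                 state = 'include_alts'
--         elif line.startswith("|SEC-FREE-ALT|"):
--             if state == 'plain':
--                 final_lines.append(line)
--             elif state == 'include_alts':
--                 final_lines.append(line.split("|", 2)[2])
--             # state == 'skip_alts': drop the line
--         else:
--             final_lines.append(line)
--             state = 'plain'
--     return "\n".join(final_lines)
-- ===== Notes on version B (the rewrite author's own statement) =====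
-- stated objective: simpler
-- what changed: Replaced A's index-driven outer while with two nested inner whiles (skip / include-cleaned runs of |SEC-FREE-ALT| lines) by a single forward pass over prompt_lines that carries a three-valued state variable ('plain'/'skip_alts'/'include_alts') deciding how each |SEC-FREE-ALT| line is treated.
import Mathlib
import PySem

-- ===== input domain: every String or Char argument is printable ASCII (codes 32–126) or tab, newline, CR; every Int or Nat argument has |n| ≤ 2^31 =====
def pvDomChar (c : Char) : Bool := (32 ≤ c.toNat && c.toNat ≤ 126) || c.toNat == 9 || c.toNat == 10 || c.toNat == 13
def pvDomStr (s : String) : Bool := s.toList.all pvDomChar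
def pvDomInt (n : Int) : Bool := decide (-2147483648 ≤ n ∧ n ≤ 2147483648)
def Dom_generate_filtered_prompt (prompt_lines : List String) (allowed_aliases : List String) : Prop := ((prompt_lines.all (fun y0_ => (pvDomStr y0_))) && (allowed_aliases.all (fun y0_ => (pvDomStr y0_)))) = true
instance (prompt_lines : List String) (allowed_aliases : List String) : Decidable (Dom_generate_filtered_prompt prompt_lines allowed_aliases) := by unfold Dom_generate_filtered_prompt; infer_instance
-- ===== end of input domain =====

-- B replaces A's index-driven while loop with two nested inner whiles by a single
-- forward pass carrying a three-valued state ('plain'/'skip_alts'/'include_alts'); simpler, same cost.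

-- ===== PORT A =====

-- alias = line.split("|")[1].replace("SEC-CHECK__", "")   (index 1 exists whenever the line starts with "|")
def pvAlias (line : String) : String :=
  PySem.Str.replace (PySem.List.pyGetD ((PySem.Str.split? line "|").getD []) 1 "") "SEC-CHECK__" ""

-- line.split("|", 2)[2]   (index 2 exists iff the line contains ≥ 2 '|'; Pre_ guarantees it where A reaches it)
def pvClean (line : String) : String :=
  PySem.List.pyGetD ((PySem.Str.splitMax? line "|" 2).getD []) 2 ""

-- the two inner whiles of A over a run of "|SEC-FREE-ALT|" lines:
-- .1 = the cleaned lines of the leading run (what the include-loop appends), .2 = the remaining lines (where i stops)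
def pvAltRun : List String → List String × List String
  | [] => ([], [])
  | l :: rest =>
    if PySem.Str.startswith l "|SEC-FREE-ALT|" then
      let r := pvAltRun rest
      (pvClean l :: r.1, r.2)
    else ([], l :: rest)

theorem pvAltRun_len (l : List String) : (pvAltRun l).2.length ≤ l.length := by
  induction l with
  | nil => simp [pvAltRun]
  | cons x xs ih =>
    simp only [pvAltRun]
    split
    · simpa using Nat.le_succ_of_le ih
    · simp

-- A's outer while loop, recursion on the remaining lines
def pvLoopA (allowed : List String) : List String → List String
  | [] => []
  | line :: rest =>
    if PySem.Str.startswith line "|SEC-CHECK__" then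
      if pvAlias line ∈ allowed then
        pvClean line :: pvLoopA allowed (pvAltRun rest).2
      else
        (pvAltRun rest).1 ++ pvLoopA allowed (pvAltRun rest).2
    else
      line :: pvLoopA allowed rest
termination_by l => l.length
decreasing_by
  · exact Nat.lt_succ_of_le (pvAltRun_len rest)
  · exact Nat.lt_succ_of_le (pvAltRun_len rest)
  · simp

def generate_filtered_prompt (prompt_lines : List String) (allowed_aliases : List String) : String :=
  PySem.Str.join "\n" (pvLoopA allowed_aliases prompt_lines)

-- ===== PORT B =====

-- B's three-valued state variable
inductive PvSt | plain | skipAlts | includeAlts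
deriving DecidableEq, Repr

-- B's single for-loop over the lines, carrying the state
def pvLoopB (allowed : List String) : PvSt → List String → List String
  | _, [] => []
  | st, line :: rest =>
    if PySem.Str.startswith line "|SEC-CHECK__" then
      if pvAlias line ∈ allowed then
        pvClean line :: pvLoopB allowed PvSt.skipAlts rest
      else
        pvLoopB allowed PvSt.includeAlts rest
    else if PySem.Str.startswith line "|SEC-FREE-ALT|" then
      match st with
      | PvSt.plain => line :: pvLoopB allowed PvSt.plain rest
      | PvSt.skipAlts => pvLoopB allowed PvSt.skipAlts rest
      | PvSt.includeAlts => pvClean line :: pvLoopB allowed PvSt.includeAlts rest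
    else
      line :: pvLoopB allowed PvSt.plain rest

def generate_filtered_prompt_alt (prompt_lines : List String) (allowed_aliases : List String) : String :=
  PySem.Str.join "\n" (pvLoopB allowed_aliases PvSt.plain prompt_lines)

-- ===== PRECONDITION & SPEC =====

-- Pre_ excludes exactly the inputs on which A raises IndexError: a line starting with
-- "|SEC-CHECK__" whose parsed alias is allowed but which contains fewer than two '|',
-- so that line.split("|", 2)[2] is out of range.  (B raises there too.)
def Pre_generate_filtered_prompt (prompt_lines : List String) (allowed_aliases : List String) : Prop :=
  ∀ l ∈ prompt_lines, PySem.Str.startswith l "|SEC-CHECK__" = true →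
    pvAlias l ∈ allowed_aliases → 2 ≤ PySem.Str.count l "|"
instance (prompt_lines : List String) (allowed_aliases : List String) : Decidable (Pre_generate_filtered_prompt prompt_lines allowed_aliases) := by unfold Pre_generate_filtered_prompt; infer_instance

def pvWitness_generate_filtered_prompt : List String × List String :=
  (["hello", "|SEC-CHECK__x|p|keep me", "|SEC-FREE-ALT|p|alt", "world"], ["x"])

def Spec_generate_filtered_prompt (prompt_lines : List String) (allowed_aliases : List String) (out : String) : Prop := out = generate_filtered_prompt_alt prompt_lines allowed_aliases
instance (prompt_lines : List String) (allowed_aliases : List String) (out : String) : Decidable (Spec_generate_filtered_prompt prompt_lines allowed_aliases out) := by unfold Spec_generate_filtered_prompt; infer_instance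

-- ===== CLAIM (what is proved, stated in full; the proofs are below) =====
def Claim_equal_generate_filtered_prompt : Prop := ∀ (prompt_lines : List String) (allowed_aliases : List String), Dom_generate_filtered_prompt prompt_lines allowed_aliases → Pre_generate_filtered_prompt prompt_lines allowed_aliases → Spec_generate_filtered_prompt prompt_lines allowed_aliases (generate_filtered_prompt prompt_lines allowed_aliases)

-- ===== LEMMAS AND PROOFS =====

-- a "|SEC-FREE-ALT|" line never also starts with "|SEC-CHECK__"
theorem pv_alt_not_check {l : String}
    (h1 : PySem.Str.startswith l "|SEC-FREE-ALT|" = true) :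
    PySem.Str.startswith l "|SEC-CHECK__" = true → False := by
  intro h2
  simp only [PySem.Str.startswith_eq] at h1 h2
  have p1 := (PySem.Chars.startswith_iff _ _).mp h1
  have p2 := (PySem.Chars.startswith_iff _ _).mp h2
  rcases List.prefix_or_prefix_of_prefix p1 p2 with h | h
  · exact absurd h (by decide)
  · exact absurd h (by decide)

-- after a run of alt lines, the head of the suffix is not an alt line, so the
-- state B carries into it is irrelevant
theorem pvLoopB_skip (allowed : List String) (l : List String) :
    pvLoopB allowed PvSt.skipAlts l = pvLoopB allowed PvSt.plain (pvAltRun l).2 := by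
  induction l with
  | nil => simp [pvAltRun, pvLoopB]
  | cons x xs ih =>
    by_cases hAlt : PySem.Str.startswith x "|SEC-FREE-ALT|" = true
    · have hChk : ¬ PySem.Str.startswith x "|SEC-CHECK__" = true :=
        fun h => pv_alt_not_check hAlt h
      simp only [pvAltRun, hAlt, if_true, pvLoopB, if_neg hChk]
      exact ih
    · simp only [pvAltRun, if_neg hAlt, pvLoopB]

theorem pvLoopB_incl (allowed : List String) (l : List String) :
    pvLoopB allowed PvSt.includeAlts l =
      (pvAltRun l).1 ++ pvLoopB allowed PvSt.plain (pvAltRun l).2 := by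
  induction l with
  | nil => simp [pvAltRun, pvLoopB]
  | cons x xs ih =>
    by_cases hAlt : PySem.Str.startswith x "|SEC-FREE-ALT|" = true
    · have hChk : ¬ PySem.Str.startswith x "|SEC-CHECK__" = true :=
        fun h => pv_alt_not_check hAlt h
      simp only [pvAltRun, hAlt, if_true, pvLoopB, if_neg hChk, List.cons_append]
      exact congrArg _ ih
    · simp only [pvAltRun, if_neg hAlt, pvLoopB, List.nil_append]

theorem pvLoop_eq (allowed : List String) (l : List String) :
    pvLoopA allowed l = pvLoopB allowed PvSt.plain l := by
  induction hn : l.length using Nat.strong_induction_on generalizing l with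
  | _ n ih =>
    match l, hn with
    | [], _ => simp [pvLoopA, pvLoopB]
    | line :: rest, hn =>
      by_cases hChk : PySem.Str.startswith line "|SEC-CHECK__" = true
      · by_cases hAl : pvAlias line ∈ allowed
        · simp only [pvLoopA, pvLoopB, if_pos hChk, if_pos hAl]
          rw [pvLoopB_skip]
          refine congrArg _ (ih (pvAltRun rest).2.length ?_ _ rfl)
          subst hn
          exact Nat.lt_succ_of_le (pvAltRun_len rest)
        · simp only [pvLoopA, pvLoopB, if_pos hChk, if_neg hAl]
          rw [pvLoopB_incl]
          refine congrArg _ (ih (pvAltRun rest).2.length ?_ _ rfl)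
          subst hn
          exact Nat.lt_succ_of_le (pvAltRun_len rest)
      · have hrest : rest.length < n := by subst hn; simp
        simp only [pvLoopA, pvLoopB, if_neg hChk]
        split
        · exact congrArg _ (ih rest.length hrest _ rfl)
        · exact congrArg _ (ih rest.length hrest _ rfl)

-- ===== VERDICT (by name: the statement is the Claim_ definition above) =====
theorem generate_filtered_prompt_spec : Claim_equal_generate_filtered_prompt := by
  intro prompt_lines allowed_aliases _ _
  unfold Spec_generate_filtered_prompt generate_filtered_prompt generate_filtered_prompt_alt
  rw [pvLoop_eq]
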